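-- pv_equiv track=rewrite | github.com/Shnob/4DChess | main.py | queenFunc
-- ===== SOURCE A (Python) =====
-- def queenFunc(s1, s2):
--     dim = []
--
--     for i in range(len(s1)):
--         if s1[i] - s2[i] != 0:
--             dim.append(abs(s1[i] - s2[i]))
--
--     if len(dim) == 0:
--         return False
--     if len(dim) == 1:
--         return True
--
--     n = dim[0]
--
--     for i in range(1, len(dim)):
--         if dim[i] != n:
--             return False
--     return True
-- ===== SOURCE B (Python) =====
-- def queenFunc(s1, s2):
--     total = 0
--     biggest = 0
--     moved = 0
--     for i in range(len(s1)):
--         d = abs(s1[i] - s2[i])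
--         total += d
--         if d > biggest:
--             biggest = d
--         if d != 0:
--             moved += 1
--     return moved > 0 and total == biggest * moved
-- ===== Notes on version B (the rewrite author's own statement) =====
-- stated objective: alternative
-- what changed: Replaces A's collected difference list, its len==0/len==1 branches and its compare-each-to-dim[0] scan by a single arithmetic pass keeping only three counters (sum, max, nonzero count) and deciding via the identity sum == max*count, which holds iff all nonzero magnitudes are equal.
import Mathlib
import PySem

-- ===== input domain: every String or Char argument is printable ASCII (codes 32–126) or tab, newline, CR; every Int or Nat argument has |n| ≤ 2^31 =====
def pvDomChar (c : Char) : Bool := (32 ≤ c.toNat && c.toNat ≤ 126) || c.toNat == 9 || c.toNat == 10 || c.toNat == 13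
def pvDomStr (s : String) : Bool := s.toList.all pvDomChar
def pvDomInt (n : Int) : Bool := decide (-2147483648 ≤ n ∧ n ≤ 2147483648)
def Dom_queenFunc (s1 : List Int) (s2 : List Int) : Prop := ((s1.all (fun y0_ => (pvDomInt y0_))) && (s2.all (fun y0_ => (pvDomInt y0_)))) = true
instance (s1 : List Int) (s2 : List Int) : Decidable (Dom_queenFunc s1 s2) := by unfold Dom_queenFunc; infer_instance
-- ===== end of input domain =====

-- B replaces A's difference list, length branches and compare-to-dim[0] scan by one arithmetic
-- pass keeping sum/max/count of nonzero magnitudes and testing sum == max*count (objective: alternative).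


-- ===== PORT A =====
-- dim = []; for i in range(len(s1)): if s1[i] - s2[i] != 0: dim.append(abs(s1[i] - s2[i]))
def queenFuncDim (s1 : List Int) (s2 : List Int) : List Int :=
  (PySem.List.pyRange 0 s1.length 1).foldl
    (fun dim i =>
      if PySem.List.pyGetD s1 i 0 - PySem.List.pyGetD s2 i 0 ≠ 0 then
        dim ++ [|PySem.List.pyGetD s1 i 0 - PySem.List.pyGetD s2 i 0|]
      else dim) []

def queenFunc (s1 : List Int) (s2 : List Int) : Bool :=
  let dim := queenFuncDim s1 s2
  if dim.length = 0 then false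
  else if dim.length = 1 then true
  else
    let n := PySem.List.pyGetD dim 0 0
    -- for i in range(1, len(dim)): if dim[i] != n: return False;  return True
    (PySem.List.pyRange 1 dim.length 1).all (fun i => PySem.List.pyGetD dim i 0 == n)

-- ===== PORT B =====
-- one pass with counters total/biggest/moved; return moved > 0 and total == biggest * moved
def queenFunc_alt (s1 : List Int) (s2 : List Int) : Bool :=
  let st :=
    (PySem.List.pyRange 0 s1.length 1).foldl
      (fun (acc : Int × Int × Int) i =>
        let d := |PySem.List.pyGetD s1 i 0 - PySem.List.pyGetD s2 i 0|
        let total := acc.1 + d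
        let biggest := if d > acc.2.1 then d else acc.2.1
        let moved := if d ≠ 0 then acc.2.2 + 1 else acc.2.2
        (total, biggest, moved))
      (0, 0, 0)
  decide (st.2.2 > 0) && (st.1 == st.2.1 * st.2.2)

-- ===== PRECONDITION & SPEC =====
-- Both programs index s2[i] for every i < len(s1): Pre_ excludes exactly the inputs
-- where s2 is shorter than s1, on which Python A raises IndexError (B raises there too).
def Pre_queenFunc (s1 : List Int) (s2 : List Int) : Prop := s1.length ≤ s2.length
instance (s1 : List Int) (s2 : List Int) : Decidable (Pre_queenFunc s1 s2) := by unfold Pre_queenFunc; infer_instance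
def pvWitness_queenFunc : List Int × List Int := ([1, 2], [3, 4])

def Spec_queenFunc (s1 : List Int) (s2 : List Int) (out : Bool) : Prop := out = queenFunc_alt s1 s2
instance (s1 : List Int) (s2 : List Int) (out : Bool) : Decidable (Spec_queenFunc s1 s2 out) := by unfold Spec_queenFunc; infer_instance

-- ===== CLAIM (what is proved, stated in full; the proofs are below) =====
def Claim_equal_queenFunc : Prop := ∀ (s1 : List Int) (s2 : List Int), Dom_queenFunc s1 s2 → Pre_queenFunc s1 s2 → Spec_queenFunc s1 s2 (queenFunc s1 s2)

-- ===== LEMMAS AND PROOFS =====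

-- the nonzero-magnitude list both programs are about
def diffList (s1 s2 : List Int) : List Int :=
  ((s1.zip s2).filter (fun p => p.1 - p.2 ≠ 0)).map (fun p => |p.1 - p.2|)

-- B's loop body as a function of the pair (s1[i], s2[i])
def bstep (acc : Int × Int × Int) (p : Int × Int) : Int × Int × Int :=
  let d := |p.1 - p.2|
  (acc.1 + d, if d > acc.2.1 then d else acc.2.1, if d ≠ 0 then acc.2.2 + 1 else acc.2.2)

-- an index loop reading s1[i], s2[i] for i < len(s1) is a fold over zip(s1, s2)
lemma fold_two_to_zip {β : Type} (s1 s2 : List Int) (h : s1.length ≤ s2.length)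
    (g : β → Int × Int → β) (init : β) :
    (PySem.List.pyRange 0 s1.length 1).foldl
       (fun acc i => g acc (PySem.List.pyGetD s1 i 0, PySem.List.pyGetD s2 i 0)) init
    = (s1.zip s2).foldl g init := by
  have hlen : (s1.zip s2).length = s1.length := by simp; omega
  rw [show ((s1.length : Int)) = ((s1.zip s2).length : Int) by exact_mod_cast hlen.symm]
  rw [← PySem.List.foldl_pyRange_zero_pyGetD' (s1.zip s2) (0,0) g init]
  apply PySem.List.foldl_congr_mem
  intro acc i hi
  rw [PySem.List.mem_pyRange_one] at hi
  obtain ⟨h0, h1⟩ := hi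
  have h1' : i < (s1.length : Int) := by omega
  have h2' : i < (s2.length : Int) := by omega
  rw [PySem.List.pyGetD_eq_getElem s1 0 h0 h1', PySem.List.pyGetD_eq_getElem s2 0 h0 h2',
      PySem.List.pyGetD_eq_getElem (s1.zip s2) (0,0) h0 h1, List.getElem_zip]

lemma dimA_eq (s1 s2 : List Int) (h : s1.length ≤ s2.length) :
    queenFuncDim s1 s2 = diffList s1 s2 := by
  unfold queenFuncDim
  rw [fold_two_to_zip s1 s2 h
        (fun dim p => if p.1 - p.2 ≠ 0 then dim ++ [|p.1 - p.2|] else dim) []]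
  have := PySem.List.foldl_append_if (fun p : Int × Int => decide (p.1 - p.2 ≠ 0))
      (fun p => |p.1 - p.2|) (s1.zip s2) []
  simpa [diffList] using this

-- B's counter fold over the pair list computes (sum, max, length) of the nonzero magnitudes
lemma bfold_eq : ∀ (L : List (Int × Int)) (t b c : Int), 0 ≤ b →
    L.foldl bstep (t, b, c)
    = (t + ((L.filter (fun p => p.1 - p.2 ≠ 0)).map (fun p => |p.1 - p.2|)).sum,
       ((L.filter (fun p => p.1 - p.2 ≠ 0)).map (fun p => |p.1 - p.2|)).foldl max b,
       c + (((L.filter (fun p => p.1 - p.2 ≠ 0)).map (fun p => |p.1 - p.2|)).length : Int)) := by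
  intro L
  induction L with
  | nil => intro t b c hb; simp
  | cons p L ih =>
      intro t b c hb
      simp only [List.foldl_cons]
      rw [show bstep (t, b, c) p
            = (t + |p.1 - p.2|, if |p.1 - p.2| > b then |p.1 - p.2| else b,
               if |p.1 - p.2| ≠ 0 then c + 1 else c) from rfl]
      have hmax : (if |p.1 - p.2| > b then |p.1 - p.2| else b) = max b |p.1 - p.2| := by
        split_ifs <;> omega
      rw [hmax]
      by_cases hz : p.1 - p.2 = 0
      · have hd0 : |p.1 - p.2| = 0 := abs_eq_zero.mpr hz
        rw [hd0, if_neg (by simp), max_eq_left hb, add_zero, ih t b c hb]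
        simp [hz]
      · have hd0 : |p.1 - p.2| ≠ 0 := fun hh => hz (abs_eq_zero.mp hh)
        rw [if_pos hd0,
            ih (t + |p.1 - p.2|) (max b |p.1 - p.2|) (c + 1)
              (le_trans hb (le_max_left _ _))]
        simp only [List.filter_cons, decide_eq_true_eq, if_pos hz, List.map_cons,
          List.sum_cons, List.length_cons, List.foldl_cons]
        simp only [Prod.mk.injEq]
        refine ⟨by ring, trivial, by push_cast; ring⟩

-- helper facts about foldl max
lemma le_foldl_max : ∀ (D : List Int) (a : Int), a ≤ D.foldl max a := by
  intro D
  induction D with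
  | nil => intro a; simp
  | cons x t ih => intro a; simpa using le_trans (le_max_left a x) (ih (max a x))

lemma mem_le_foldl_max : ∀ (D : List Int) (a d : Int), d ∈ D → d ≤ D.foldl max a := by
  intro D
  induction D with
  | nil => intro a d h; simp at h
  | cons x t ih =>
      intro a d h
      rcases List.mem_cons.mp h with rfl | h
      · exact le_trans (le_max_right a d) (le_foldl_max t (max a d))
      · exact ih (max a x) d h

lemma foldl_max_le : ∀ (D : List Int) (a m : Int), a ≤ m → (∀ d ∈ D, d ≤ m) →
    D.foldl max a ≤ m := by
  intro D
  induction D with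
  | nil => intro a m ha _; simpa using ha
  | cons x t ih =>
      intro a m ha hD
      exact ih (max a x) m (max_le ha (hD x List.mem_cons_self)) fun d hd => hD d (by simp [hd])

lemma sum_le_of_forall_le : ∀ (D : List Int) (m : Int), (∀ d ∈ D, d ≤ m) →
    D.sum ≤ m * D.length := by
  intro D
  induction D with
  | nil => intro m _; simp
  | cons x t ih =>
      intro m h
      have h1 : x ≤ m := h x List.mem_cons_self
      have h2 : t.sum ≤ m * t.length := ih m fun d hd => h d (by simp [hd])
      simp only [List.sum_cons, List.length_cons]
      push_cast
      nlinarith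

lemma sum_all_eq : ∀ (r : List Int) (x : Int), (∀ d ∈ r, d = x) →
    r.sum = x * (r.length : Int) := by
  intro r
  induction r with
  | nil => intro x _; simp
  | cons y t ih =>
      intro x h
      have hy : y = x := h y List.mem_cons_self
      have ht := ih x fun d hd => h d (by simp [hd])
      simp only [List.sum_cons, List.length_cons]
      push_cast
      rw [hy, ht]
      ring

lemma all_eq_of_sum_eq : ∀ (D : List Int) (m : Int), (∀ d ∈ D, d ≤ m) →
    D.sum = m * D.length → ∀ d ∈ D, d = m := by
  intro D
  induction D with
  | nil => intro m _ _ d hd; simp at hd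
  | cons x t ih =>
      intro m h hsum d hd
      have h1 : x ≤ m := h x List.mem_cons_self
      have h2 : t.sum ≤ m * t.length := sum_le_of_forall_le t m fun d hd => h d (by simp [hd])
      have hsum' : x + t.sum = m * ((t.length : Int) + 1) := by
        simpa [List.sum_cons, List.length_cons] using hsum
      have hx : x = m := by nlinarith
      have ht : t.sum = m * t.length := by nlinarith
      rcases List.mem_cons.mp hd with rfl | hd
      · exact hx
      · exact ih m (fun d hd => h d (by simp [hd])) ht d hd

-- A's tail check on a nonempty list equals "every later element equals the head"
lemma tailA_eq (x : Int) (r : List Int) :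
    (if (x :: r).length = 0 then false
     else if (x :: r).length = 1 then true
     else (PySem.List.pyRange 1 (x :: r).length 1).all
        (fun i => PySem.List.pyGetD (x :: r) i 0 == PySem.List.pyGetD (x :: r) 0 0))
    = r.all (fun z => z == x) := by
  match r with
  | [] => simp
  | y :: t =>
    rw [if_neg (by simp), if_neg (by simp)]
    have h0 : PySem.List.pyGetD (x :: y :: t) 0 0 = x := by simp [PySem.List.pyGetD]
    rw [h0]
    rw [show (fun i => PySem.List.pyGetD (x :: y :: t) i 0 == x)
          = ((fun z => z == x) ∘ (fun i => PySem.List.pyGetD (x :: y :: t) i 0)) from rfl,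
        ← List.all_map, PySem.List.map_pyGetD_pyRange' (x :: y :: t) 0 (by norm_num)]
    simp

-- the core equivalence on the magnitude list: all (positive) elements equal iff
-- the sum equals max times length, and the list is nonempty
lemma core_eq (D : List Int) (hpos : ∀ d ∈ D, 0 < d) :
    (if D.length = 0 then false
     else if D.length = 1 then true
     else (PySem.List.pyRange 1 D.length 1).all
        (fun i => PySem.List.pyGetD D i 0 == PySem.List.pyGetD D 0 0))
    = (decide ((0 : Int) < (D.length : Int)) && (D.sum == D.foldl max 0 * (D.length : Int))) := by
  match D with
  | [] => simp
  | x :: r =>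
    rw [tailA_eq x r]
    have hx : 0 < x := hpos x List.mem_cons_self
    have hlenpos : (0 : Int) < (((x :: r).length : Nat) : Int) := by
      simp only [List.length_cons]; push_cast; omega
    rw [Bool.eq_iff_iff]
    simp only [Bool.and_eq_true, decide_eq_true_eq, beq_iff_eq, List.all_eq_true]
    constructor
    · intro h
      have hall : ∀ d ∈ (x :: r), d = x := by
        intro d hd
        rcases List.mem_cons.mp hd with rfl | hd
        · rfl
        · simpa using h d hd
      have hmax : (x :: r).foldl max 0 = x :=
        le_antisymm (foldl_max_le _ 0 x (le_of_lt hx) fun d hd => le_of_eq (hall d hd))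
          (mem_le_foldl_max _ 0 x List.mem_cons_self)
      exact ⟨hlenpos, by rw [sum_all_eq (x :: r) x hall, hmax]⟩
    · rintro ⟨-, hsum⟩ z hz
      have hall := all_eq_of_sum_eq (x :: r) ((x :: r).foldl max 0)
        (fun d hd => mem_le_foldl_max _ 0 d hd) hsum
      exact (hall z (by simp [hz])).trans (hall x List.mem_cons_self).symm

-- B's whole function, rephrased through bstep over the zipped list
lemma alt_eq (s1 s2 : List Int) (h : s1.length ≤ s2.length) :
    queenFunc_alt s1 s2
      = (let st := (s1.zip s2).foldl bstep (0, 0, 0)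
         decide (st.2.2 > 0) && (st.1 == st.2.1 * st.2.2)) := by
  unfold queenFunc_alt
  rw [show (fun (acc : Int × Int × Int) (i : Int) =>
        let d := |PySem.List.pyGetD s1 i 0 - PySem.List.pyGetD s2 i 0|
        let total := acc.1 + d
        let biggest := if d > acc.2.1 then d else acc.2.1
        let moved := if d ≠ 0 then acc.2.2 + 1 else acc.2.2
        (total, biggest, moved))
      = (fun acc i => bstep acc (PySem.List.pyGetD s1 i 0, PySem.List.pyGetD s2 i 0)) from rfl,
    fold_two_to_zip s1 s2 h bstep (0, 0, 0)]

-- ===== VERDICT (by name: the statement is the Claim_ definition above) =====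
theorem queenFunc_spec : Claim_equal_queenFunc := by
  intro s1 s2 _ hpre
  unfold Spec_queenFunc
  rw [alt_eq s1 s2 hpre]
  rw [show (s1.zip s2).foldl bstep ((0 : Int), (0 : Int), (0 : Int))
        = _ from bfold_eq (s1.zip s2) 0 0 0 le_rfl]
  unfold queenFunc
  rw [dimA_eq s1 s2 hpre]
  have hpos : ∀ d ∈ diffList s1 s2, 0 < d := by
    intro d hd
    simp only [diffList, List.mem_map, List.mem_filter] at hd
    obtain ⟨p, ⟨-, hp⟩, rfl⟩ := hd
    exact abs_pos.mpr (by simpa using hp)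
  have hc := core_eq (diffList s1 s2) hpos
  simp only [diffList] at hc
  simp only [diffList]
  rw [hc]
  simp only [gt_iff_lt, zero_add]
  rfl
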